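-- pv_equiv track=rewrite | github.com/Xabilahu/Robotics | PlayerStage/nabegazioa/astar.py | find_valid_positions
-- ===== SOURCE A (Python) =====
-- def find_valid_positions(maze):
--     start = None
--     end = None
--
--     for i in range(len(maze)):
--         for j in range(len(maze)):
--             if maze[i][j] == 0:
--                 start = (i, j)
--                 break
--         if start is not None:
--             break
--
--     for i in reversed(range(len(maze))):
--         for j in reversed(range(len(maze))):
--             if maze[i][j] == 0:
--                 end = (i, j)
--                 break
--         if end is not None:
--             break
--
--     return start, end
-- ===== SOURCE B (Python) =====
-- def find_valid_positions(maze):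
--     n = len(maze)
--     zeros = [(i, j) for i in range(n) for j in range(n) if maze[i][j] == 0]
--     if zeros:
--         return zeros[0], zeros[-1]
--     return None, None
-- ===== Notes on version B (the rewrite author's own statement) =====
-- stated objective: simpler
-- what changed: A's two separate early-exit nested scans (forward for the first zero, reversed for the last) are replaced by materialising the row-major list of all zero cells with one comprehension and returning its first and last element.
-- outside the precondition, e.g. on find_valid_positions([[0, 1, 2], [9], [2, 0, 1]]): A returns ((0, 0), (2, 1)), B raises IndexError
import Mathlib
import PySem

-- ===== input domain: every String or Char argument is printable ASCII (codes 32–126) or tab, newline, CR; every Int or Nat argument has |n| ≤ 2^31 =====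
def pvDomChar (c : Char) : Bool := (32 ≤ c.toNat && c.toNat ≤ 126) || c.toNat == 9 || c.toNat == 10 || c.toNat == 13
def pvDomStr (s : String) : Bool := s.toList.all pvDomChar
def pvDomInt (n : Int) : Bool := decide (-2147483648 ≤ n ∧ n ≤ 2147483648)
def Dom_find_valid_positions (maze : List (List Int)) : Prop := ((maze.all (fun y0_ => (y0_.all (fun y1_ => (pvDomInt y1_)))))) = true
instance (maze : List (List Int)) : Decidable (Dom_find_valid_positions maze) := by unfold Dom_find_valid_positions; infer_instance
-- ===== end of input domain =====

-- B replaces A's two early-exit scans by one comprehension listing all zero cells in row-major order and returning its first and last element (simpler decomposition, same O(n^2) cost; no speed claim).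


-- ===== PORT A =====
-- maze[i][j]: exact via pyGet? when both indices are in range, which Pre_ guarantees
-- for every index either port reads; the getD fallbacks are never reached inside Pre_.
def pvCell (maze : List (List Int)) (i j : Int) : Int :=
  (PySem.List.pyGet? ((PySem.List.pyGet? maze i).getD []) j).getD 1

-- A: scan forward with break-on-first-zero (findSome? = loop with break), then the
-- same with both loops reversed (reversed(range(n)) = (range n).reverse).
def find_valid_positions (maze : List (List Int)) : (Option (Int × Int)) × (Option (Int × Int)) :=
  ((PySem.List.pyRange 0 (maze.length : Int) 1).findSome? (fun i =>
     (PySem.List.pyRange 0 (maze.length : Int) 1).findSome? (fun j =>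
       if pvCell maze i j == 0 then some (i, j) else none)),
   (PySem.List.pyRange 0 (maze.length : Int) 1).reverse.findSome? (fun i =>
     (PySem.List.pyRange 0 (maze.length : Int) 1).reverse.findSome? (fun j =>
       if pvCell maze i j == 0 then some (i, j) else none)))

-- ===== PORT B =====
-- B: the comprehension '[(i, j) for i in range(n) for j in range(n) if maze[i][j]==0]'
-- is a flatMap of filterMaps; 'zeros[0]'/'zeros[-1]' guarded by nonemptiness are
-- exactly head? and getLast?.
def find_valid_positions_alt (maze : List (List Int)) : (Option (Int × Int)) × (Option (Int × Int)) :=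
  let n : Int := (maze.length : Int)
  let zeros : List (Int × Int) :=
    (PySem.List.pyRange 0 n 1).flatMap (fun i =>
      (PySem.List.pyRange 0 n 1).filterMap (fun j =>
        if pvCell maze i j == 0 then some (i, j) else none))
  (zeros.head?, zeros.getLast?)

-- ===== PRECONDITION & SPEC =====
-- Pre_ excludes ragged mazes (some row shorter than len(maze)): on them Python A raises
-- IndexError, except when its early-exit breaks skip the short row and it still returns;
-- B's comprehension reads every cell and raises IndexError on all such inputs.
def Pre_find_valid_positions (maze : List (List Int)) : Prop :=
  ∀ row ∈ maze, maze.length ≤ row.length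
instance (maze : List (List Int)) : Decidable (Pre_find_valid_positions maze) := by
  unfold Pre_find_valid_positions; infer_instance

def pvWitness_find_valid_positions : List (List Int) := [[1, 0, 2], [3, 4, 5], [0, 6, 0]]

def Spec_find_valid_positions (maze : List (List Int)) (out : (Option (Int × Int)) × (Option (Int × Int))) : Prop := out = find_valid_positions_alt maze
instance (maze : List (List Int)) (out : (Option (Int × Int)) × (Option (Int × Int))) : Decidable (Spec_find_valid_positions maze out) := by unfold Spec_find_valid_positions; infer_instance

-- ===== CLAIM (what is proved, stated in full; the proofs are below) =====
def Claim_equal_find_valid_positions : Prop := ∀ (maze : List (List Int)), Dom_find_valid_positions maze → Pre_find_valid_positions maze → Spec_find_valid_positions maze (find_valid_positions maze)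

-- ===== LEMMAS AND PROOFS =====

-- The list of zero cells of row i, in scan order.
def pvRow (maze : List (List Int)) (idxs : List Int) (i : Int) : List (Int × Int) :=
  idxs.filterMap (fun j => if pvCell maze i j == 0 then some (i, j) else none)

-- All zero cells in row-major order.
def pvZeros (maze : List (List Int)) (idxs : List Int) : List (Int × Int) :=
  idxs.flatMap (pvRow maze idxs)

theorem pv_findSome?_eq_head?_filterMap {α β : Type} (l : List α) (f : α → Option β) :
    l.findSome? f = (l.filterMap f).head? := by
  induction l with
  | nil => rfl
  | cons a l ih =>
    cases h : f a with
    | none => simp only [List.findSome?_cons, List.filterMap_cons, h]; exact ih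
    | some b => simp only [List.findSome?_cons, List.filterMap_cons, h, List.head?_cons]

theorem pv_head?_flatMap {α β : Type} (l : List α) (g : α → List β) :
    (l.flatMap g).head? = l.findSome? (fun a => (g a).head?) := by
  induction l with
  | nil => rfl
  | cons a l ih =>
    cases h : g a with
    | nil => simp [List.flatMap_cons, List.findSome?, h, ih]
    | cons b t => simp [List.flatMap_cons, List.findSome?, h]

-- A's forward scan computes the head of the zero list.
theorem pvA_start (maze : List (List Int)) (idxs : List Int) :
    idxs.findSome? (fun i =>
      idxs.findSome? (fun j => if pvCell maze i j == 0 then some (i, j) else none))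
    = (pvZeros maze idxs).head? := by
  rw [pvZeros, pv_head?_flatMap]
  congr 1
  funext i
  rw [pv_findSome?_eq_head?_filterMap, pvRow]

-- A's reversed scan computes the last zero cell.
theorem pvA_stop (maze : List (List Int)) (idxs : List Int) :
    idxs.reverse.findSome? (fun i =>
      idxs.reverse.findSome? (fun j => if pvCell maze i j == 0 then some (i, j) else none))
    = (pvZeros maze idxs).getLast? := by
  rw [← List.head?_reverse, pvZeros, List.reverse_flatMap, pv_head?_flatMap]
  congr 1
  funext i
  simp only [Function.comp]
  rw [pv_findSome?_eq_head?_filterMap, pvRow, List.filterMap_reverse]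

-- ===== VERDICT (by name: the statement is the Claim_ definition above) =====
theorem find_valid_positions_spec : Claim_equal_find_valid_positions := by
  intro maze _ _
  unfold Spec_find_valid_positions find_valid_positions find_valid_positions_alt
  rw [pvA_start, pvA_stop]
  rfl
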